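-- pv_equiv track=rewrite | github.com/pphuangyi/coderalla | HackerRank/BusStation/code.py | solve
-- ===== SOURCE A (Python) =====
-- def helper(arr, k):
--     A = 0
--     for i, a in enumerate(arr):
--         A += a
--         if A == k:
--             A = 0
--         elif A > k:
--             return False
--     return A == 0
--
-- def solve(arr):
--     M = sum(arr)
--     prefix_sum = 0
--     results = []
--     for i, a in enumerate(arr):
--         prefix_sum += a
--         if M % prefix_sum != 0:
--             continue
--         if helper(arr[i + 1:], prefix_sum):
--             results.append(prefix_sum)
--     return results
-- ===== SOURCE B (Python) =====
-- def solve(arr):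
--     # One simultaneous forward sweep: each divisor prefix p spawns an automaton
--     # [p, expected]; on every new prefix sum all live automata are advanced at once
--     # (advance on hit, discard on overshoot).  A candidate wins iff it is still live
--     # at the end with expected == total + p.  No slicing, no per-candidate re-scan.
--     total = sum(arr)
--     s = 0
--     live = []  # live automata [p, expected], in creation order
--     for a in arr:
--         s += a
--         keep = []
--         for c in live:
--             if s == c[1]:
--                 c[1] += c[0]
--                 keep.append(c)
--             elif s < c[1]:
--                 keep.append(c)
--             # s > expected: automaton dies, dropped
--         if total % s == 0:
--             keep.append([s, 2 * s])
--         live = keep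
--     return [p for p, e in live if e == s + p]
-- ===== Notes on version B (the rewrite author's own statement) =====
-- stated objective: alternative
-- what changed: B replaces A's per-candidate re-scan (helper() re-summing the slice arr[i+1:] for every divisor prefix) by a single simultaneous forward sweep: each divisor prefix p spawns an automaton [p, expected] and on every new prefix sum all live automata are advanced at once (advance on hit, discard on overshoot), with the success test reduced to the closed condition expected == total + p at the end.
import Mathlib
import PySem

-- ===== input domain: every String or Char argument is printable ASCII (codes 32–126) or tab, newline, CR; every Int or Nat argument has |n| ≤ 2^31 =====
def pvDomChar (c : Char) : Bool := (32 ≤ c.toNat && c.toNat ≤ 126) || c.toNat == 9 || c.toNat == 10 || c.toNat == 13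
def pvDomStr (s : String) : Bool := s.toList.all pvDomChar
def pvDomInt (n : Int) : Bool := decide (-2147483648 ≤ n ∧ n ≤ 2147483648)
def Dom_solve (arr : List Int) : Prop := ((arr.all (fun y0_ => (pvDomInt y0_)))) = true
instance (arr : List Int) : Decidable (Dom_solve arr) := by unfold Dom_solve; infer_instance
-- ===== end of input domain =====

-- B does one simultaneous forward sweep advancing all divisor-prefix automata (p, expected) at once,
-- dropping dead ones; A re-sums a slice of arr per candidate (alternative algorithm, same worst case).


-- ===== PORT A =====
-- helper(arr, k): running sum A, reset on A == k, early False on A > k, final A == 0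
def helperGo (k A : Int) : List Int → Bool
  | [] => A == 0
  | a :: rest =>
      let A' := A + a
      if A' == k then helperGo k 0 rest
      else if A' > k then false
      else helperGo k A' rest

-- the loop of solve: carries prefix_sum and results; arr[i+1:] is the remaining list `rest`
def solveGo (M prefixSum : Int) (results : List Int) : List Int → List Int
  | [] => results
  | a :: rest =>
      let p := prefixSum + a
      if PySem.Int.mod M p != 0 then solveGo M p results rest
      else if helperGo p 0 rest then solveGo M p (results ++ [p]) rest
      else solveGo M p results rest

def solve (arr : List Int) : List Int := solveGo arr.sum 0 [] arr

-- ===== PORT B =====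
-- the body of Source B's inner `for c in live` loop: advance/keep/drop each automaton on prefix sum s
def stepCands (s : Int) : List (Int × Int) → List (Int × Int)
  | [] => []
  | c :: rest =>
      if s == c.2 then (c.1, c.2 + c.1) :: stepCands s rest
      else if s < c.2 then c :: stepCands s rest
      else stepCands s rest

-- the outer `for a in arr` loop of Source B: returns (final s, final live list)
def passGo (total s : Int) (live : List (Int × Int)) : List Int → Int × List (Int × Int)
  | [] => (s, live)
  | a :: rest =>
      let s' := s + a
      let keep := stepCands s' live
      passGo total s'
        (if PySem.Int.mod total s' == 0 then keep ++ [(s', 2 * s')] else keep) rest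

-- the final list comprehension of Source B
def solve_alt (arr : List Int) : List Int :=
  let total := arr.sum
  let r := passGo total 0 [] arr
  r.2.filterMap (fun c => if c.2 == r.1 + c.1 then some c.1 else none)

-- ===== PRECONDITION & SPEC =====
-- Pre_ excludes exactly the inputs where A raises ZeroDivisionError (some prefix sum is 0).
def Pre_solve (arr : List Int) : Prop := ∀ i : Nat, i < arr.length → (arr.take (i + 1)).sum ≠ 0
instance (arr : List Int) : Decidable (Pre_solve arr) := by unfold Pre_solve; infer_instance
def pvWitness_solve : List Int := [2, 2]

def Spec_solve (arr : List Int) (out : List Int) : Prop := out = solve_alt arr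
instance (arr : List Int) (out : List Int) : Decidable (Spec_solve arr out) := by unfold Spec_solve; infer_instance

-- ===== CLAIM (what is proved, stated in full; the proofs are below) =====
def Claim_equal_solve : Prop := ∀ (arr : List Int), Dom_solve arr → Pre_solve arr → Spec_solve arr (solve arr)

-- ===== LEMMAS AND PROOFS =====

-- proof-side abstraction: the prefix sums of `rest` starting from running total t
def prefixList (t : Int) : List Int → List Int
  | [] => []
  | a :: rest => (t + a) :: prefixList (t + a) rest

-- proof-side abstraction of one automaton's life: expected counter against total T
def altCheck (p T expected : Int) : List Int → Bool
  | [] => expected == T + p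
  | s :: rest =>
      if s == expected then altCheck p T (expected + p) rest
      else if s > expected then false
      else altCheck p T expected rest

-- proof-side: one automaton run over a list of prefix sums ([] = it died)
def runCand (c : Int × Int) : List Int → List (Int × Int)
  | [] => [c]
  | q :: r =>
      if q == c.2 then runCand (c.1, c.2 + c.1) r
      else if q < c.2 then runCand c r
      else []

-- helper's state A at global prefix value t corresponds to altCheck's expected = t - A + k.
theorem helper_eq_altCheck (rest : List Int) : ∀ (k t A : Int),
    helperGo k A rest = altCheck k (t + rest.sum) (t - A + k) (prefixList t rest) := by
  induction rest with
  | nil =>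
      intro k t A
      simp only [helperGo, altCheck, prefixList, List.sum_nil]
      by_cases h : A = 0 <;> simp [h]
  | cons a rs ih =>
      intro k t A
      simp only [helperGo, altCheck, prefixList, List.sum_cons]
      have hc : ((t + a : Int) == t - A + k) = ((A + a : Int) == k) := by
        by_cases h : A + a = k <;> simp [h] <;> omega
      rw [hc]
      by_cases h1 : (A + a : Int) = k
      · simp only [h1, beq_self_eq_true, if_true]
        have := ih k (t + a) 0
        rw [this]
        have e1 : t - A + k + k = t + a - 0 + k := by omega
        have e2 : t + (a + rs.sum) = t + a + rs.sum := by ring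
        rw [e1, e2]
      · simp only [beq_iff_eq, h1, if_false]
        have hgt : ((t + a : Int) > t - A + k) ↔ ((A + a : Int) > k) := by omega
        by_cases h2 : (A + a : Int) > k
        · simp [h2, hgt.mpr h2]
        · have h2' : ¬ ((t + a : Int) > t - A + k) := fun hh => h2 (hgt.mp hh)
          simp only [gt_iff_lt] at h2 h2' ⊢
          rw [if_neg h2, if_neg h2']
          have := ih k (t + a) (A + a)
          rw [this]
          have e1 : t - A + k = t + a - (A + a) + k := by omega
          have e2 : t + (a + rs.sum) = t + a + rs.sum := by ring
          rw [e1, e2]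

-- one sweep step acts on each automaton independently
theorem stepCands_flatMap (live : List (Int × Int)) (s : Int) :
    stepCands s live = live.flatMap (fun c =>
      if s == c.2 then [(c.1, c.2 + c.1)] else if s < c.2 then [c] else []) := by
  induction live with
  | nil => rfl
  | cons c rest ih =>
      simp only [stepCands, List.flatMap_cons, ih]
      by_cases h1 : s = c.2
      · simp [h1]
      · by_cases h2 : s < c.2 <;> simp [h1, h2]

-- a whole sweep acts on each automaton independently: runCand over the prefix sums
theorem passGo_flatMap (rest : List Int) : ∀ (T s : Int) (live : List (Int × Int)),
    (passGo T s live rest).2 =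
      live.flatMap (fun c => runCand c (prefixList s rest)) ++ (passGo T s [] rest).2 := by
  induction rest with
  | nil => intro T s live; simp [passGo, prefixList, runCand]
  | cons a r ih =>
      intro T s live
      have hstep : List.flatMap (fun c => runCand c (prefixList (s + a) r))
            (stepCands (s + a) live) =
          List.flatMap (fun c => runCand c ((s + a) :: prefixList (s + a) r)) live := by
        rw [stepCands_flatMap, List.flatMap_assoc]
        apply List.flatMap_congr
        intro c _
        simp only [runCand]
        by_cases h1 : (s + a : Int) = c.2
        · simp [h1]
        · by_cases h2 : (s + a : Int) < c.2 <;> simp [h1, h2]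
      simp only [passGo, prefixList, stepCands]
      by_cases hm : PySem.Int.mod T (s + a) == 0
      · rw [if_pos hm, if_pos hm,
          ih T (s + a) (stepCands (s + a) live ++ [(s + a, 2 * (s + a))]),
          ih T (s + a) ([] ++ [(s + a, 2 * (s + a))])]
        simp only [List.flatMap_append, List.nil_append, hstep, List.append_assoc]
      · rw [if_neg hm, if_neg hm, ih T (s + a) (stepCands (s + a) live)]
        simp only [hstep]

-- reading a single automaton's final state through altCheck
theorem runCand_filter (l : List Int) : ∀ (p e T : Int),
    (runCand (p, e) l).filterMap
        (fun c => if c.2 == T + c.1 then some c.1 else none) =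
      (if altCheck p T e l then [p] else []) := by
  induction l with
  | nil =>
      intro p e T
      simp only [runCand, altCheck, List.filterMap_cons, List.filterMap_nil]
      by_cases h : (e : Int) = T + p <;> simp [h]
  | cons q r ih =>
      intro p e T
      simp only [runCand, altCheck]
      by_cases h1 : (q : Int) = e
      · simp only [h1, beq_self_eq_true, if_true]; exact ih p (e + p) T
      · by_cases h2 : (q : Int) < e
        · have h3 : ¬ (q : Int) > e := by omega
          simpa [h1, h2, h3] using ih p e T
        · have h3 : (q : Int) > e := by omega
          simp [h1, h2, h3]

-- the final s of the sweep is the running total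
theorem passGo_fst (rest : List Int) : ∀ (T s : Int) (live : List (Int × Int)),
    (passGo T s live rest).1 = s + rest.sum := by
  induction rest with
  | nil => intro T s live; simp [passGo]
  | cons a r ih => intro T s live; simp [passGo, ih, List.sum_cons]; ring

-- main correspondence between A's loop and B's sweep
theorem main_eq (rest : List Int) : ∀ (T s : Int) (results : List Int),
    s + rest.sum = T → (∀ x ∈ prefixList s rest, x ≠ 0) →
    solveGo T s results rest =
      results ++ (passGo T s [] rest).2.filterMap
        (fun c => if c.2 == T + c.1 then some c.1 else none) := by
  induction rest with
  | nil => intro T s results _ _; simp [solveGo, passGo]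
  | cons a r ih =>
      intro T s results hsum hnz
      have hnz' : ∀ x ∈ prefixList (s + a) r, x ≠ 0 := fun x hx =>
        hnz x (by simp only [prefixList, List.mem_cons]; right; exact hx)
      have hsum' : (s + a) + r.sum = T := by
        simp only [List.sum_cons] at hsum; omega
      have hpass : (passGo T s [] (a :: r)).2 =
          (if PySem.Int.mod T (s + a) == 0 then [((s + a : Int), 2 * (s + a))] else []).flatMap
              (fun c => runCand c (prefixList (s + a) r)) ++ (passGo T (s + a) [] r).2 := by
        simp only [passGo, stepCands]
        exact passGo_flatMap r T (s + a) _
      have hchk : altCheck (s + a) T (2 * (s + a)) (prefixList (s + a) r) =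
          helperGo (s + a) 0 r := by
        rw [helper_eq_altCheck r (s + a) (s + a) 0, hsum']
        congr 1
        ring
      simp only [solveGo, hpass, List.filterMap_append]
      by_cases hm : PySem.Int.mod T (s + a) = 0
      · have hb1 : ¬ ((PySem.Int.mod T (s + a) != 0) = true) := by simp [hm]
        have hb2 : (PySem.Int.mod T (s + a) == 0) = true := by simp [hm]
        rw [if_neg hb1, if_pos hb2]
        simp only [List.flatMap_cons, List.flatMap_nil, List.append_nil]
        rw [runCand_filter (prefixList (s + a) r) (s + a) (2 * (s + a)) T, hchk]
        by_cases hh : helperGo (s + a) 0 r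
        · rw [if_pos hh, if_pos hh, ih T (s + a) (results ++ [s + a]) hsum' hnz']
          simp
        · rw [if_neg (by simpa using hh), if_neg (by simpa using hh),
            ih T (s + a) results hsum' hnz']
          simp
      · have hb1 : (PySem.Int.mod T (s + a) != 0) = true := by simpa using hm
        have hb2 : ¬ ((PySem.Int.mod T (s + a) == 0) = true) := by simpa using hm
        rw [if_pos hb1, if_neg hb2]
        rw [ih T (s + a) results hsum' hnz']
        simp only [List.flatMap_nil, List.filterMap_nil, List.nil_append]

theorem pre_to_prefixList (arr : List Int) : ∀ (t : Int),
    (∀ i : Nat, i < arr.length → t + (arr.take (i + 1)).sum ≠ 0) →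
    ∀ x ∈ prefixList t arr, x ≠ 0 := by
  induction arr with
  | nil => intro t _ x hx; simp [prefixList] at hx
  | cons a rs ih =>
      intro t h x hx
      simp only [prefixList, List.mem_cons] at hx
      rcases hx with rfl | hx
      · have := h 0 (by simp)
        simpa using this
      · exact ih (t + a) (fun i hi => by
          have := h (i + 1) (by simp; omega)
          simpa [add_assoc] using this) x hx

-- ===== VERDICT (by name: the statement is the Claim_ definition above) =====
theorem solve_spec : Claim_equal_solve := by
  intro arr _ hpre
  unfold Spec_solve solve solve_alt
  show solveGo arr.sum 0 [] arr =
    (passGo arr.sum 0 [] arr).2.filterMap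
      (fun c => if c.2 == (passGo arr.sum 0 [] arr).1 + c.1 then some c.1 else none)
  rw [passGo_fst arr arr.sum 0 []]
  simpa using main_eq arr arr.sum 0 [] (by simp)
    (pre_to_prefixList arr 0 (fun i hi => by simpa using hpre i hi))
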